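-- pv_equiv track=rewrite | github.com/realengineerbo/flashlight-dev-hw | scripts/hdr.py | remove_above_x
-- ===== SOURCE A (Python) =====
-- def remove_above_x(sorted_list, x):
--     """Removes all elements in a sorted list above a given value."""
--     # Use binary search to find the first index of an element <= x
--     low = 0
--     high = len(sorted_list) - 1
--     while low <= high:
--         mid = (low + high) // 2
--         if sorted_list[mid] <= x:
--             low = mid + 1
--         else:
--             high = mid - 1
--
--     # Slice the list from the found index to keep elements <= x
--     return sorted_list[:low]
-- ===== SOURCE B (Python) =====
-- def _kept(seg, x):
--     """Number of leading elements the search keeps, by divide and conquer on the segment itself."""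
--     if not seg:
--         return 0
--     m = (len(seg) - 1) // 2
--     if seg[m] <= x:
--         return m + 1 + _kept(seg[m + 1:], x)
--     else:
--         return _kept(seg[:m], x)
--
--
-- def remove_above_x(sorted_list, x):
--     """Removes all elements in a sorted list above a given value."""
--     return sorted_list[:_kept(sorted_list, x)]
-- ===== Notes on version B (the rewrite author's own statement) =====
-- stated objective: alternative
-- what changed: Replaced the imperative low/high-index binary-search loop plus a final slice of the original list by a recursive divide-and-conquer helper that works on actual sublists (no index state): it splits the segment at its middle element and counts how many leading elements are kept.
import Mathlib
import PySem

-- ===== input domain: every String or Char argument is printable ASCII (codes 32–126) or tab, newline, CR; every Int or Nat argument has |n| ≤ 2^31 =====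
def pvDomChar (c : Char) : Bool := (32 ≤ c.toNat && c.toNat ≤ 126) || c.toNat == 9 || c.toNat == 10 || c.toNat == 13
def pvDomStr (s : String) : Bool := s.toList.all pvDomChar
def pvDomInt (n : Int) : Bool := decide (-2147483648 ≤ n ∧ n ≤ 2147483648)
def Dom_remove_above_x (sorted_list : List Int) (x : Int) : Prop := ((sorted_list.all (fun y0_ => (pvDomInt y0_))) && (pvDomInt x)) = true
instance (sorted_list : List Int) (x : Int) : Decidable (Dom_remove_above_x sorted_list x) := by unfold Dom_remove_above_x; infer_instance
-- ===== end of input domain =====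

-- B re-implements A's index-based binary-search loop as a recursion over sublists (alternative decomposition, same cost); both are total and agree everywhere.

-- ===== PORT A =====
-- The while loop over (low, high), with a structural fuel counter as the totality
-- guard (fuel = length + 1 never runs out: the range high - low + 1 shrinks each
-- iteration); sorted_list[mid] is always in range on reachable states, ported as
-- pyGetD (the default is never used there).
def removeLoopA (lst : List Int) (x : Int) : Nat → Int → Int → Int
  | 0, low, _ => low
  | fuel + 1, low, high =>
    if low ≤ high then
      let mid := PySem.Int.floordiv (low + high) 2
      if PySem.List.pyGetD lst mid 0 ≤ x then removeLoopA lst x fuel (mid + 1) high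
      else removeLoopA lst x fuel low (mid - 1)
    else low

def remove_above_x (sorted_list : List Int) (x : Int) : List Int :=
  PySem.List.slice sorted_list none
    (some (removeLoopA sorted_list x (sorted_list.length + 1) 0 (PySem.List.len sorted_list - 1)))

-- ===== PORT B =====
-- _kept from Source B: divide and conquer on the segment itself, with a structural fuel
-- counter as the totality guard (fuel = length suffices: both sublists are shorter);
-- seg[m+1:] / seg[:m] are the nonnegative slices drop / take
-- (PySem.List.slice_from_natCast / slice_to_natCast).
def keptAlt (x : Int) : Nat → List Int → Nat
  | 0, _ => 0
  | _, [] => 0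
  | fuel + 1, a :: rest =>
    let m := ((a :: rest).length - 1) / 2
    if PySem.List.pyGetD (a :: rest) (m : Int) 0 ≤ x then
      m + 1 + keptAlt x fuel ((a :: rest).drop (m + 1))
    else
      keptAlt x fuel ((a :: rest).take m)

def remove_above_x_alt (sorted_list : List Int) (x : Int) : List Int :=
  sorted_list.take (keptAlt x sorted_list.length sorted_list)

-- ===== PRECONDITION & SPEC =====
def Spec_remove_above_x (sorted_list : List Int) (x : Int) (out : List Int) : Prop := out = remove_above_x_alt sorted_list x
instance (sorted_list : List Int) (x : Int) (out : List Int) : Decidable (Spec_remove_above_x sorted_list x out) := by unfold Spec_remove_above_x; infer_instance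

-- ===== CLAIM (what is proved, stated in full; the proofs are below) =====
def Claim_equal_remove_above_x : Prop := ∀ (sorted_list : List Int) (x : Int), Dom_remove_above_x sorted_list x → Spec_remove_above_x sorted_list x (remove_above_x sorted_list x)

-- ===== LEMMAS AND PROOFS =====

theorem keptAlt_nil (x : Int) (kf : Nat) : keptAlt x kf [] = 0 := by
  cases kf <;> simp [keptAlt]

-- The loop from state (low, high) returns low plus the kept-count of the segment
-- lst[low : high+1], for any sufficient fuel on either side.
theorem loop_eq_kept (lst : List Int) (x : Int) : ∀ (fuel : Nat) (low high : Int) (kf : Nat),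
    0 ≤ low → high < (lst.length : Int) → (high + 1 - low).toNat ≤ fuel → (high + 1 - low).toNat ≤ kf →
    removeLoopA lst x fuel low high
      = low + (keptAlt x kf ((lst.drop low.toNat).take (high + 1 - low).toNat) : Int) := by
  intro fuel
  induction fuel with
  | zero =>
    intro low high kf hl hh hf hkf
    have h0 : (high + 1 - low).toNat = 0 := by omega
    simp [removeLoopA, h0, keptAlt_nil]
  | succ fuel ih =>
    intro low high kf hl hh hf hkf
    rw [removeLoopA]
    by_cases hcmp : low ≤ high
    · simp only [hcmp, if_pos]
      have hmid := PySem.Int.floordiv_two_mid_bounds hcmp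
      rw [PySem.Int.floordiv_eq_ediv_of_pos (by norm_num)] at hmid ⊢
      set L := low.toNat with hL
      set K := (high + 1 - low).toNat with hK
      set seg := (lst.drop L).take K with hseg
      have hlenlst : (0:Int) ≤ (lst.length : Int) := by positivity
      have hlen : seg.length = K := by
        simp only [hseg, List.length_take, List.length_drop]; omega
      have hKpos : 0 < K := by omega
      cases hsc : seg with
      | nil => exact absurd (hsc ▸ hlen) (by simp; omega)
      | cons a rest =>
        obtain ⟨kf', rfl⟩ : ∃ kf', kf = kf' + 1 := ⟨kf - 1, by omega⟩
        rw [keptAlt]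
        have hlen' : (a :: rest).length = K := hsc ▸ hlen
        set m := ((a :: rest).length - 1) / 2 with hm
        have hmK : m = (K - 1) / 2 := by rw [hm, hlen']
        have hmidnat : ((low + high) / 2).toNat = L + m := by
          rw [hmK]; omega
        have hmlt : m < K := by omega
        -- the two branches compare the same element of lst
        have hel : PySem.List.pyGetD lst ((low + high) / 2) 0
            = PySem.List.pyGetD (a :: rest) (m : Int) 0 := by
          rw [PySem.List.pyGetD_eq_getElem lst 0 (by omega) (by omega),
              PySem.List.pyGetD_eq_getElem (a :: rest) 0 (by omega) (by omega)]
          simp only [Int.toNat_natCast, hmidnat]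
          have hopt : lst[L + m]? = (a :: rest)[m]? := by
            rw [← hsc, hseg]
            simp [List.getElem?_drop, hmlt]
          rw [lst.getElem?_eq_getElem (by omega), (a :: rest).getElem?_eq_getElem (by omega)] at hopt
          exact Option.some.inj hopt
        rw [← hel]
        by_cases hle : PySem.List.pyGetD lst ((low + high) / 2) 0 ≤ x
        · simp only [hle, if_pos]
          have IH := ih ((low + high) / 2 + 1) high kf' (by omega) hh (by omega) (by omega)
          rw [IH]
          have hsub : (a :: rest).drop (m + 1)
              = (lst.drop ((low + high) / 2 + 1).toNat).take (high + 1 - ((low + high) / 2 + 1)).toNat := by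
            rw [← hsc, hseg, List.drop_take, List.drop_drop]
            have h1 : ((low + high) / 2 + 1).toNat = L + (m + 1) := by omega
            have h2 : (high + 1 - ((low + high) / 2 + 1)).toNat = K - (m + 1) := by omega
            rw [h1, h2]
          rw [← hsub]
          push_cast
          omega
        · simp only [hle, if_neg, not_false_iff]
          have IH := ih low ((low + high) / 2 - 1) kf' hl (by omega) (by omega) (by omega)
          rw [IH]
          have hsub : (a :: rest).take m
              = (lst.drop L).take ((low + high) / 2 - 1 + 1 - low).toNat := by
            rw [← hsc, hseg, List.take_take]
            have : min m K = ((low + high) / 2 - 1 + 1 - low).toNat := by omega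
            rw [this]
          rw [← hsub]
    · simp only [hcmp, if_neg, not_false_iff]
      have h0 : (high + 1 - low).toNat = 0 := by omega
      simp [h0, keptAlt_nil]

-- ===== VERDICT (by name: the statement is the Claim_ definition above) =====
theorem remove_above_x_spec : Claim_equal_remove_above_x := by
  intro lst x _
  unfold Spec_remove_above_x remove_above_x remove_above_x_alt
  have h := loop_eq_kept lst x (lst.length + 1) 0 ((lst.length : Int) - 1) lst.length le_rfl (by omega) (by omega) (by omega)
  simp only [PySem.List.len_eq] at *
  rw [h]
  have : ((lst.length : Int) - 1 + 1 - 0).toNat = lst.length := by omega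
  simp only [Int.toNat_zero, List.drop_zero, this, List.take_length, zero_add]
  rw [PySem.List.slice_to_natCast]
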